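-- pv_equiv track=rewrite | github.com/MarcDAFrame/ITI1120 | work/ASSIGNMENTS/Assignment#2/part2.py | nonrepetitive
-- ===== SOURCE A (Python) =====
-- def nonrepetitive(s):
--     words = []
--     for i in range(len(s)):
--         for j in range(i, (len(s)+2)//2):
--             words.append((s[i:i+j], i, i+j))
--     for word in words:
--         for word2 in words:
--             if word[0] == word2[0] and word != word2:
--                 return False
--     return True
-- ===== SOURCE B (Python) =====
-- def nonrepetitive(s):
--     words = []
--     for i in range(len(s)):
--         for j in range(i, (len(s)+2)//2):
--             words.append(s[i:i+j])
--     words.sort()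
--     for a, b in zip(words, words[1:]):
--         if a == b:
--             return False
--     return True
-- ===== Notes on version B (the rewrite author's own statement) =====
-- stated objective: faster
-- what changed: A's all-pairs nested comparison of the collected substrings is replaced by collecting just the substring texts, sorting them, and scanning adjacent pairs once for a duplicate.
import Mathlib
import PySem

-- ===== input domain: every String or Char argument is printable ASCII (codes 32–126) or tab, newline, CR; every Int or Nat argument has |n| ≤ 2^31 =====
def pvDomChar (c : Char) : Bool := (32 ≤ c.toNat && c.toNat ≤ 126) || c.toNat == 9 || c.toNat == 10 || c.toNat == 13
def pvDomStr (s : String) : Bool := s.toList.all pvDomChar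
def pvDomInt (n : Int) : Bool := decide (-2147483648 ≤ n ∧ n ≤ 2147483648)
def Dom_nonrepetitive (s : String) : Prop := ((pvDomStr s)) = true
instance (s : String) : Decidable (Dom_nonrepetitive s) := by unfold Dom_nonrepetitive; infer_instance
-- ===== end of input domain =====

-- B replaces A's all-pairs duplicate search over the collected substrings by a sort
-- followed by a single adjacent-pair scan (objective: faster).

-- ===== PORT A =====
-- the two generation loops: words.append((s[i:i+j], i, i+j))
def buildWordsA (cs : List Char) : List (List Char × Int × Int) :=
  (PySem.List.pyRange 0 (cs.length : Int) 1).foldl (fun words i =>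
    (PySem.List.pyRange i (PySem.Int.floordiv ((cs.length : Int) + 2) 2) 1).foldl
      (fun ws j => ws ++ [(PySem.List.slice cs (some i) (some (i + j)), i, i + j)]) words) []

def nonrepetitive (s : String) : Bool :=
  let words := buildWordsA s.toList
  -- nested loops with early 'return False' ⇔ short-circuiting all/all
  words.all (fun w => words.all (fun w2 => !(decide (w.1 = w2.1 ∧ w ≠ w2))))

-- ===== PORT B =====
-- same two generation loops, collecting only the substring text
def buildTextsB (cs : List Char) : List (List Char) :=
  (PySem.List.pyRange 0 (cs.length : Int) 1).foldl (fun words i =>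
    (PySem.List.pyRange i (PySem.Int.floordiv ((cs.length : Int) + 2) 2) 1).foldl
      (fun ws j => ws ++ [PySem.List.slice cs (some i) (some (i + j))]) words) []

-- the zip(words, words[1:]) scan: False on the first equal adjacent pair
def adjDupFreeB : List (List Char) → Bool
  | a :: b :: rest => if a = b then false else adjDupFreeB (b :: rest)
  | _ => true

def nonrepetitive_alt (s : String) : Bool :=
  adjDupFreeB (PySem.List.sorted (buildTextsB s.toList) (fun t => String.ofList t) false)

-- ===== PRECONDITION & SPEC =====
def Spec_nonrepetitive (s : String) (out : Bool) : Prop := out = nonrepetitive_alt s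
instance (s : String) (out : Bool) : Decidable (Spec_nonrepetitive s out) := by unfold Spec_nonrepetitive; infer_instance

-- ===== CLAIM (what is proved, stated in full; the proofs are below) =====
def Claim_equal_nonrepetitive : Prop := ∀ (s : String), Dom_nonrepetitive s → Spec_nonrepetitive s (nonrepetitive s)

-- ===== LEMMAS AND PROOFS =====

lemma buildWordsA_eq (cs : List Char) :
    buildWordsA cs =
      (PySem.List.pyRange 0 (cs.length : Int) 1).flatMap (fun i =>
        (PySem.List.pyRange i (PySem.Int.floordiv ((cs.length : Int) + 2) 2) 1).map
          (fun j => (PySem.List.slice cs (some i) (some (i + j)), i, i + j))) := by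
  simp [buildWordsA, ← List.flatMap_def,
    ← List.map_eq_flatMap]

lemma buildTextsB_eq (cs : List Char) :
    buildTextsB cs = (buildWordsA cs).map (·.1) := by
  simp [buildTextsB, buildWordsA_eq,
    ← List.flatMap_def, ← List.map_eq_flatMap, List.map_flatMap, Function.comp_def]

lemma buildWordsA_nodup (cs : List Char) : (buildWordsA cs).Nodup := by
  rw [buildWordsA_eq, List.nodup_flatMap]
  constructor
  · intro i _
    exact (PySem.List.nodup_pyRange_one _ _).map_on (by
      intro j _ j' _ h
      have : i + j = i + j' := congrArg (fun p => p.2.2) h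
      omega)
  · refine (PySem.List.pairwise_lt_pyRange_one 0 _).imp ?_
    intro i i' hlt w hw hw'
    simp only [List.mem_map] at hw hw'
    obtain ⟨j, _, rfl⟩ := hw
    obtain ⟨j', _, h⟩ := hw'
    have : i' = i := congrArg (fun p => p.2.1) h
    omega

lemma portA_iff (s : String) :
    nonrepetitive s = true ↔ ((buildWordsA s.toList).map (·.1)).Nodup := by
  rw [List.nodup_map_iff_inj_on (buildWordsA_nodup s.toList)]
  simp only [nonrepetitive, List.all_eq_true, Bool.not_eq_eq_eq_not, Bool.not_true,
    decide_eq_false_iff_not, not_and, not_not]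

lemma adjDupFreeB_iff_nodup (l : List (List Char))
    (h : l.Pairwise (fun a b => String.ofList a ≤ String.ofList b)) :
    adjDupFreeB l = true ↔ l.Nodup := by
  induction l with
  | nil => simp [adjDupFreeB]
  | cons a t ih =>
    cases t with
    | nil => simp [adjDupFreeB]
    | cons b rest =>
      have hle : ∀ x ∈ b :: rest, String.ofList a ≤ String.ofList x := by
        intro x hx; exact (List.pairwise_cons.mp h).1 x hx
      have htail := (List.pairwise_cons.mp h).2
      by_cases hab : a = b
      · subst hab
        simp [adjDupFreeB, List.nodup_cons]
      · rw [show adjDupFreeB (a :: b :: rest) = adjDupFreeB (b :: rest) by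
          simp [adjDupFreeB, hab]]
        rw [ih htail]
        constructor
        · intro hn
          refine List.nodup_cons.mpr ⟨?_, hn⟩
          intro hmem
          rcases List.mem_cons.mp hmem with rfl | hmem
          · exact hab rfl
          · -- a ∈ rest: then ofList b ≤ ofList a and ofList a ≤ ofList b, so a = b
            have h1 : String.ofList b ≤ String.ofList a :=
              (List.pairwise_cons.mp htail).1 a hmem
            have h2 : String.ofList a ≤ String.ofList b := hle b (by simp)
            have : String.ofList a = String.ofList b := le_antisymm h2 h1
            exact hab (String.ofList_inj.mp this)
        · intro hn
          exact (List.nodup_cons.mp hn).2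

lemma portB_iff (s : String) :
    nonrepetitive_alt s = true ↔ ((buildWordsA s.toList).map (·.1)).Nodup := by
  unfold nonrepetitive_alt
  rw [buildTextsB_eq]
  set ts := (buildWordsA s.toList).map (·.1)
  rw [adjDupFreeB_iff_nodup _ (PySem.List.sorted_pairwise ts _)]
  exact (PySem.List.sorted_perm ts _ _).nodup_iff

-- ===== VERDICT (by name: the statement is the Claim_ definition above) =====
theorem nonrepetitive_spec : Claim_equal_nonrepetitive := by
  intro s _
  unfold Spec_nonrepetitive
  have := (portA_iff s).trans (portB_iff s).symm
  cases hA : nonrepetitive s <;> cases hB : nonrepetitive_alt s <;>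
    simp_all
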